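-- pv_equiv track=rewrite | github.com/Computamos/Guias-TDA | guia2/codigo.py | maxiSubconjunto_posta
-- ===== SOURCE A (Python) =====
-- def maxiSubconjunto_posta(matriz:list[list[int]], I:set[int], inicio:int, n:int, k:int, I_mejor_actual:set[int], sum_mejor_actual:int)->tuple[set, int]:
--
--     if k == 0:
--         acc:int = 0
--         for valor in I:
--             for valor_2 in I:
--                 acc += matriz[valor][valor_2]
--         if acc >= sum_mejor_actual:
--             return I.copy(), acc
--         return I_mejor_actual, sum_mejor_actual
--
--     for valor in range(inicio, n):
--         I.add(valor)
--         parc_mejor, parc_sum_mejor = maxiSubconjunto_posta(matriz, I, valor+1, n, k-1, I_mejor_actual, sum_mejor_actual)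
--         if parc_sum_mejor > sum_mejor_actual:
--             I_mejor_actual = parc_mejor.copy()
--             sum_mejor_actual = parc_sum_mejor
--         I.remove(valor)
--
--     return I_mejor_actual, sum_mejor_actual
-- ===== SOURCE B (Python) =====
-- def maxiSubconjunto_posta(matriz, I, inicio, n, k, I_mejor_actual, sum_mejor_actual):
--     # prune: no k-subset of range(inicio, n) exists
--     if k < 0 or (k > 0 and inicio + k > n):
--         return I_mejor_actual, sum_mejor_actual
--     cur = list(I)
--     acc0 = sum(matriz[u][w] for u in cur for w in cur)
--
--     def go(start, left, acc, best_set, best_sum):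
--         if left == 0:
--             if acc >= best_sum:
--                 return set(cur), acc
--             return best_set, best_sum
--         for v in range(start, n - left + 1):
--             delta = matriz[v][v] + sum(matriz[u][v] + matriz[v][u] for u in cur)
--             cur.append(v)
--             bs, bm = go(v + 1, left - 1, acc + delta, best_set, best_sum)
--             cur.pop()
--             if bm > best_sum:
--                 best_set, best_sum = bs, bm
--         return best_set, best_sum
--
--     return go(inicio, k, acc0, I_mejor_actual, sum_mejor_actual)
-- ===== Notes on version B (the rewrite author's own statement) =====
-- stated objective: alternative
-- what changed: B maintains the quadratic-form sum incrementally along the recursion (adding matriz[v][v] plus the cross terms when v joins the current set) and prunes branches that cannot complete a k-subset, instead of A's full double loop over the set at every leaf.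
-- outside the precondition, e.g. on maxiSubconjunto_posta([[5, 0], [0, 1]], {0}, 0, 2, 1, set(), 0): A returns ({0}, 5), B returns ({0}, 20); on maxiSubconjunto_posta([[1], [2, 3]], set(), 0, 2, 1, set(), 0): A returns ({1}, 3), B returns ({1}, 3)
import Mathlib
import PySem

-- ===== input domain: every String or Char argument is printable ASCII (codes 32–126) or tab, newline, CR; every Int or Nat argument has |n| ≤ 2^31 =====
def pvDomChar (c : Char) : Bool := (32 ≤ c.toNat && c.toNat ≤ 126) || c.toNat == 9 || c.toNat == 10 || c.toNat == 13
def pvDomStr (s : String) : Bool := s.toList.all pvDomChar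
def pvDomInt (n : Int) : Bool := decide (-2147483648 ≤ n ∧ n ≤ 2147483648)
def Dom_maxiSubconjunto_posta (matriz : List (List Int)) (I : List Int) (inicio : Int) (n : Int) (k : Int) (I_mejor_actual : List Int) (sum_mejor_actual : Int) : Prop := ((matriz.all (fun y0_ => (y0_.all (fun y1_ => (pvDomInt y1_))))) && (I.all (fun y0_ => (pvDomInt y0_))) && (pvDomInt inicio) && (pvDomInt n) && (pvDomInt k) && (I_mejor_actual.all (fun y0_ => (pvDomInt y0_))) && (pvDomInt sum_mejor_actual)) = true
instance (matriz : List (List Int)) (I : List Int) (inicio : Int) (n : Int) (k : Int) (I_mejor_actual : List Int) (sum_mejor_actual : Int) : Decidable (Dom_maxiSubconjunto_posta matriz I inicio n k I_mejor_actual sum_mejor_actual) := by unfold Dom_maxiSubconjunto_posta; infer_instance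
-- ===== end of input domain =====

-- B replaces A's O(k^2) per-leaf double loop by a quadratic-form sum maintained incrementally
-- along the recursion (plus pruning of branches that cannot reach a full k-subset); equivalence
-- is about the RETURN value only (A mutates I in place but restores it on the admitted inputs).

-- ===== PORT A =====
-- matriz[u][w]; total via getD: Pre_ keeps every index actually used in range, where this is exact
def pvGetA (matriz : List (List Int)) (u w : Int) : Int :=
  (PySem.List.pyGet? ((PySem.List.pyGet? matriz u).getD []) w).getD 0

-- the k == 0 leaf of A: the double loop over I, then the >= comparison
def pvLeafA (matriz : List (List Int)) (I : List Int) (I_mejor_actual : List Int) (sum_mejor_actual : Int) : List Int × Int :=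
  let acc := I.foldl (fun a valor => I.foldl (fun a2 valor2 => a2 + pvGetA matriz valor valor2) a) 0
  if acc ≥ sum_mejor_actual then (I, acc) else (I_mejor_actual, sum_mejor_actual)

-- A's recursion; fuel is a totality guard only: at every reachable call (n - inicio).toNat < fuel,
-- and at fuel 0 necessarily inicio ≥ n, where the 'for' loop body is Python's empty loop
def pvRecA (matriz : List (List Int)) : Nat → List Int → Int → Int → Int → List Int → Int → List Int × Int
  | 0, I, _inicio, _n, k, I_mejor_actual, sum_mejor_actual =>
      if k = 0 then pvLeafA matriz I I_mejor_actual sum_mejor_actual else (I_mejor_actual, sum_mejor_actual)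
  | fuel + 1, I, inicio, n, k, I_mejor_actual, sum_mejor_actual =>
      if k = 0 then pvLeafA matriz I I_mejor_actual sum_mejor_actual
      else if inicio < n then
        -- one iteration of 'for valor in range(inicio, n)' at valor = inicio, then the rest of the loop
        let r := pvRecA matriz fuel (PySem.Set.add I inicio) (inicio + 1) n (k - 1) I_mejor_actual sum_mejor_actual
        let st := if r.2 > sum_mejor_actual then r else (I_mejor_actual, sum_mejor_actual)
        pvRecA matriz fuel I (inicio + 1) n k st.1 st.2
      else (I_mejor_actual, sum_mejor_actual)

def maxiSubconjunto_posta (matriz : List (List Int)) (I : List Int) (inicio : Int) (n : Int) (k : Int) (I_mejor_actual : List Int) (sum_mejor_actual : Int) : List Int × Int :=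
  pvRecA matriz ((n - inicio).toNat + 1) I inicio n k I_mejor_actual sum_mejor_actual

-- ===== PORT B =====
-- the left == 0 leaf of Source B's go: acc already holds the quadratic form of cur
def pvLeafB (cur : List Int) (acc : Int) (bestSet : List Int) (bestSum : Int) : List Int × Int :=
  if acc ≥ bestSum then (PySem.Set.ofList cur, acc) else (bestSet, bestSum)

-- Source B's recursive helper 'go'; fuel is a totality guard only (at fuel 0 the pruned loop is empty)
def pvGoB (matriz : List (List Int)) : Nat → List Int → Int → Int → Int → Int → List Int → Int → List Int × Int
  | 0, cur, _start, _n, left, acc, bestSet, bestSum =>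
      if left = 0 then pvLeafB cur acc bestSet bestSum else (bestSet, bestSum)
  | fuel + 1, cur, start, n, left, acc, bestSet, bestSum =>
      if left = 0 then pvLeafB cur acc bestSet bestSum
      else if start + left ≤ n then
        -- one iteration of 'for v in range(start, n - left + 1)' at v = start, then the rest
        let delta := pvGetA matriz start start + (cur.map (fun u => pvGetA matriz u start + pvGetA matriz start u)).sum
        let r := pvGoB matriz fuel (cur ++ [start]) (start + 1) n (left - 1) (acc + delta) bestSet bestSum
        let st := if r.2 > bestSum then r else (bestSet, bestSum)
        pvGoB matriz fuel cur (start + 1) n left acc st.1 st.2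
      else (bestSet, bestSum)

def maxiSubconjunto_posta_alt (matriz : List (List Int)) (I : List Int) (inicio : Int) (n : Int) (k : Int) (I_mejor_actual : List Int) (sum_mejor_actual : Int) : List Int × Int :=
  if k < 0 ∨ (0 < k ∧ inicio + k > n) then (I_mejor_actual, sum_mejor_actual)
  else
    let acc0 := (I.flatMap (fun u => I.map (fun w => pvGetA matriz u w))).sum
    pvGoB matriz ((n - inicio).toNat + 1) I inicio n k acc0 I_mejor_actual sum_mejor_actual

-- ===== PRECONDITION & SPEC =====
-- Pre_ admits the natural domain of the search: when a size-k subset can be completed (or k = 0,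
-- where A evaluates the quadratic form directly), I must be a duplicate-free set disjoint from the
-- candidate range [inicio, n) — A's in-place add/remove otherwise silently drops original members
-- of I mid-loop, an artefact of mutation — and every index the search can touch must be a valid
-- nonnegative matrix index (negative or out-of-range indices make A raise IndexError, up to
-- Python's negative-index wraparound and rows only as long as actually touched, which Pre_ also
-- leaves out); when no size-k subset exists, nothing is evaluated and only the depth bound below
-- applies.  A recurses to depth min(k, n - inicio) (n - inicio when k < 0), so the first conjunct
-- excludes the inputs on which A exceeds Python's recursion limit and raises RecursionError.
def Pre_maxiSubconjunto_posta (matriz : List (List Int)) (I : List Int) (inicio : Int) (n : Int) (k : Int) (I_mejor_actual : List Int) (sum_mejor_actual : Int) : Prop :=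
  (k = 0 ∨ n ≤ inicio ∨ (0 < k ∧ (k ≤ 900 ∨ n - inicio ≤ 900)) ∨ (k < 0 ∧ n - inicio ≤ 900)) ∧
  if k = 0 then
    I.Nodup ∧ ∀ u ∈ I, 0 ≤ u ∧ u < (matriz.length : Int) ∧
      ∀ w ∈ I, 0 ≤ w ∧ w < (((PySem.List.pyGet? matriz u).getD []).length : Int)
  else if 0 < k ∧ inicio + k ≤ n then
    I.Nodup ∧ (∀ v ∈ I, v < inicio) ∧
      ∀ u ∈ I ++ PySem.List.pyRange inicio n 1, 0 ≤ u ∧ u < (matriz.length : Int) ∧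
        ∀ w ∈ I ++ PySem.List.pyRange inicio n 1, 0 ≤ w ∧ w < (((PySem.List.pyGet? matriz u).getD []).length : Int)
  else True

instance (matriz : List (List Int)) (I : List Int) (inicio : Int) (n : Int) (k : Int) (I_mejor_actual : List Int) (sum_mejor_actual : Int) : Decidable (Pre_maxiSubconjunto_posta matriz I inicio n k I_mejor_actual sum_mejor_actual) := by unfold Pre_maxiSubconjunto_posta; infer_instance

def pvWitness_maxiSubconjunto_posta : List (List Int) × List Int × Int × Int × Int × List Int × Int :=
  ([[1, 2], [3, 4]], [], 0, 2, 1, [], -10)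

def Spec_maxiSubconjunto_posta (matriz : List (List Int)) (I : List Int) (inicio : Int) (n : Int) (k : Int) (I_mejor_actual : List Int) (sum_mejor_actual : Int) (out : List Int × Int) : Prop := out = maxiSubconjunto_posta_alt matriz I inicio n k I_mejor_actual sum_mejor_actual
instance (matriz : List (List Int)) (I : List Int) (inicio : Int) (n : Int) (k : Int) (I_mejor_actual : List Int) (sum_mejor_actual : Int) (out : List Int × Int) : Decidable (Spec_maxiSubconjunto_posta matriz I inicio n k I_mejor_actual sum_mejor_actual out) := by unfold Spec_maxiSubconjunto_posta; infer_instance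

-- ===== CLAIM (what is proved, stated in full; the proofs are below) =====
def Claim_equal_maxiSubconjunto_posta : Prop := ∀ (matriz : List (List Int)) (I : List Int) (inicio : Int) (n : Int) (k : Int) (I_mejor_actual : List Int) (sum_mejor_actual : Int), Dom_maxiSubconjunto_posta matriz I inicio n k I_mejor_actual sum_mejor_actual → Pre_maxiSubconjunto_posta matriz I inicio n k I_mejor_actual sum_mejor_actual → Spec_maxiSubconjunto_posta matriz I inicio n k I_mejor_actual sum_mejor_actual (maxiSubconjunto_posta matriz I inicio n k I_mejor_actual sum_mejor_actual)

-- ===== LEMMAS AND PROOFS =====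

-- the quadratic form of S, proof-side specification
def pvQ (matriz : List (List Int)) (S : List Int) : Int :=
  (S.map (fun u => (S.map (fun w => pvGetA matriz u w)).sum)).sum

theorem pv_inner_foldl (matriz : List (List Int)) (u : Int) :
    ∀ (T : List Int) (a : Int),
      T.foldl (fun a2 w => a2 + pvGetA matriz u w) a = a + (T.map (fun w => pvGetA matriz u w)).sum := by
  intro T
  induction T with
  | nil => simp
  | cons x xs ih => intro a; rw [List.foldl_cons, ih]; simp [List.map_cons]; ring

theorem pv_leaf_eq_pvQ (matriz : List (List Int)) (I : List Int) :
    I.foldl (fun a valor => I.foldl (fun a2 valor2 => a2 + pvGetA matriz valor valor2) a) 0 = pvQ matriz I := by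
  have h : ∀ (S : List Int) (a : Int),
      S.foldl (fun a valor => I.foldl (fun a2 valor2 => a2 + pvGetA matriz valor valor2) a) a
        = a + (S.map (fun u => (I.map (fun w => pvGetA matriz u w)).sum)).sum := by
    intro S
    induction S with
    | nil => simp
    | cons x xs ih =>
      intro a
      rw [List.foldl_cons, ih, pv_inner_foldl]
      simp; ring
  simpa [pvQ] using h I 0

theorem pv_sum_flatMap (f : Int → List Int) :
    ∀ (S : List Int), (S.flatMap f).sum = (S.map (fun u => (f u).sum)).sum := by
  intro S
  induction S with
  | nil => simp
  | cons x xs ih => simp [List.flatMap_cons, List.sum_append, ih]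

theorem pv_base_eq_pvQ (matriz : List (List Int)) (I : List Int) :
    (I.flatMap (fun u => I.map (fun w => pvGetA matriz u w))).sum = pvQ matriz I := by
  rw [pv_sum_flatMap]
  rfl

theorem pvQ_append (matriz : List (List Int)) (S : List Int) (v : Int) :
    pvQ matriz (S ++ [v])
      = pvQ matriz S + (pvGetA matriz v v + (S.map (fun u => pvGetA matriz u v + pvGetA matriz v u)).sum) := by
  simp [pvQ, List.map_append, List.sum_append, PySem.List.sum_map_add_int]
  ring

-- when no size-k subset of [inicio, n) exists, A returns the carried best unchanged
theorem pv_A_infeasible (matriz : List (List Int)) (nn : Int) :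
    ∀ (fuel : Nat) (I : List Int) (inicio k : Int) (Ib : List Int) (sb : Int),
      k ≠ 0 → (k < 0 ∨ nn < inicio + k) →
      pvRecA matriz fuel I inicio nn k Ib sb = (Ib, sb) := by
  intro fuel
  induction fuel with
  | zero =>
    intro I inicio k Ib sb hk _
    simp [pvRecA, hk]
  | succ fuel ih =>
    intro I inicio k Ib sb hk hinf
    rw [pvRecA]
    by_cases hlt : inicio < nn
    · have h1 : k - 1 ≠ 0 := by omega
      have h2 : k - 1 < 0 ∨ nn < (inicio + 1) + (k - 1) := by omega
      rw [ih _ _ _ _ _ h1 h2]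
      simp [hk, hlt]
      exact ih _ _ _ _ _ hk (by omega)
    · simp [hk, hlt]

-- the core invariant: A's recursion equals B's go when acc carries the quadratic form of cur
theorem pv_main (matriz : List (List Int)) (nn : Int) :
    ∀ (fuel : Nat) (cur : List Int) (start left : Int) (Ib : List Int) (sb : Int),
      (nn - start).toNat < fuel → 0 ≤ left → cur.Nodup → (∀ v ∈ cur, v < start) →
      pvRecA matriz fuel cur start nn left Ib sb
        = pvGoB matriz fuel cur start nn left (pvQ matriz cur) Ib sb := by
  intro fuel
  induction fuel with
  | zero => intro cur start left Ib sb hN; omega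
  | succ fuel ih =>
    intro cur start left Ib sb hN hle hnd hlt
    by_cases h0 : left = 0
    · subst h0
      rw [pvRecA, pvGoB]
      simp [pvLeafA, pvLeafB, pv_leaf_eq_pvQ, PySem.Set.ofList_eq_self_of_nodup _ hnd]
    · have hpos : 0 < left := by omega
      by_cases hfe : start + left ≤ nn
      · have hsn : start < nn := by omega
        have hmem : start ∉ cur := fun h => absurd (hlt start h) (by omega)
        have hadd : PySem.Set.add cur start = cur ++ [start] :=
          PySem.Set.add_of_not_mem hmem
        have hnd' : (cur ++ [start]).Nodup := by
          refine List.Nodup.append hnd (by simp) ?_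
          intro a ha hb
          simp at hb; subst hb; exact hmem ha
        rw [pvRecA, pvGoB, if_neg h0, if_neg h0, if_pos hsn, if_pos hfe, hadd]
        rw [ih (cur ++ [start]) (start + 1) (left - 1) Ib sb (by omega) (by omega) hnd'
              (by intro v hv; rcases List.mem_append.1 hv with h | h
                  · exact lt_trans (hlt v h) (by omega)
                  · simp at h; omega)]
        rw [pvQ_append]
        rw [ih cur (start + 1) left _ _ (by omega) hle hnd
              (fun v hv => lt_trans (hlt v hv) (by omega))]
      · rw [pvGoB, if_neg h0, if_neg hfe]
        exact pv_A_infeasible matriz nn (fuel + 1) cur start left Ib sb h0 (by omega)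

-- ===== VERDICT (by name: the statement is the Claim_ definition above) =====
theorem maxiSubconjunto_posta_spec : Claim_equal_maxiSubconjunto_posta := by
  intro matriz I inicio n k Ib sb _hDom hPre
  unfold Spec_maxiSubconjunto_posta
  unfold Pre_maxiSubconjunto_posta at hPre
  replace hPre := hPre.2
  unfold maxiSubconjunto_posta maxiSubconjunto_posta_alt
  by_cases hk0 : k = 0
  · subst hk0
    simp only [if_pos rfl] at hPre
    have hg : ¬ ((0 : Int) < 0 ∨ (0 < (0 : Int) ∧ inicio + 0 > n)) := by omega
    rw [if_neg hg]
    rw [pvRecA, pvGoB]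
    simp [pvLeafA, pvLeafB, pv_leaf_eq_pvQ, pv_base_eq_pvQ, PySem.Set.ofList_eq_self_of_nodup _ hPre.1]
  · by_cases hfe : 0 < k ∧ inicio + k ≤ n
    · simp only [hk0, if_false, hfe, if_pos, if_true] at hPre
      obtain ⟨hnd, hdisj, _⟩ := hPre
      have hg : ¬ (k < 0 ∨ (0 < k ∧ inicio + k > n)) := by omega
      rw [if_neg hg]
      rw [pv_main matriz n ((n - inicio).toNat + 1) I inicio k Ib sb (by omega) (by omega) hnd hdisj]
      rw [pv_base_eq_pvQ]
    · have hg : k < 0 ∨ (0 < k ∧ inicio + k > n) := by omega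
      rw [if_pos hg]
      exact pv_A_infeasible matriz n ((n - inicio).toNat + 1) I inicio k Ib sb hk0 (by omega)
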